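-- pv_equiv track=rewrite | github.com/reudekx/algorithm | 프로그래머스_고득점_KIT/동적계획법/N으로표현.py | solution
-- ===== SOURCE A (Python) =====
-- def calc(dp, a, b):
--     for left in dp[a]:
--         for right in dp[b]:
--             dp[a + b].add(left + right)
--             dp[a + b].add(left - right)
--             dp[a + b].add(left * right)
--             if right != 0:
--                 dp[a + b].add(left // right)
--
-- def solution(N, number):
--     dp = [set() for _ in range(9)]
--
--     for i in range(1, 9):
--         dp[i].add(int(str(N) * i))
--
--     if number in dp[1]:
--         return 1
--
--     for i in range(2, 9):
--         for j in range(1, i):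
--             calc(dp, j, i - j)
--
--         if number in dp[i]:
--             return i
--
--     return -1
-- ===== SOURCE B (Python) =====
-- def solution(N, number):
--     memo = {}
--
--     def reach(k):
--         if k in memo:
--             return memo[k]
--         vals = {int(str(N) * k)}
--         for j in range(1, k):
--             for left in reach(j):
--                 for right in reach(k - j):
--                     vals.add(left + right)
--                     vals.add(left - right)
--                     vals.add(left * right)
--                     if right != 0:
--                         vals.add(left // right)
--         memo[k] = vals
--         return vals
--
--     for k in range(1, 9):
--         if number in reach(k):
--             return k
--     return -1
-- ===== Notes on version B (the rewrite author's own statement) =====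
-- stated objective: alternative
-- what changed: A's bottom-up 9-slot dp table mutated in place by calc is replaced by a top-down memoized recursion reach(k) that returns the value set for exactly k copies of N, combining reach(j) and reach(k-j) with the same four operations; the driver returns the first k in 1..8 whose set contains number.
import Mathlib
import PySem

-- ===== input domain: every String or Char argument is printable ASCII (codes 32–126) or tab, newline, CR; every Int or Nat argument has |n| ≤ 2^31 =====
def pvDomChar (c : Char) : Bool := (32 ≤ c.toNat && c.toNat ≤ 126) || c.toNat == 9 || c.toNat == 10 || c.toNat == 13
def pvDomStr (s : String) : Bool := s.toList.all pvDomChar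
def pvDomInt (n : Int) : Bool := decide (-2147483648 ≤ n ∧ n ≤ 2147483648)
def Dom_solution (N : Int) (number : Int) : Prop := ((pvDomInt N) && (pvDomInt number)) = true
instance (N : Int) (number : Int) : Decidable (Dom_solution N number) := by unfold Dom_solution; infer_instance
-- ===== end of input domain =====

-- B replaces A's bottom-up 9-slot dp table (mutated in place by calc) with a top-down
-- recursion reach(k) over split sizes (memoized in Python, plain recursion here); same
-- operations, same floor division, same 1..8 bound and early-return order ("alternative").

-- ===== PORT A =====
-- int(str(N) * k); the `.getD 0` arm is Python's ValueError (N < 0, k ≥ 2), excluded by Pre_solution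
def pvSeed (N : Int) (k : Nat) : Int :=
  (PySem.Int.ofChars? ((List.replicate k (PySem.Int.toChars N)).flatten)).getD 0

-- the four dp[a+b].add(...) statements of calc's inner loop body (shared text of A and B)
def pvOps (s : PySem.Set Int) (l r : Int) : PySem.Set Int :=
  let s1 := PySem.Set.add s (l + r)
  let s2 := PySem.Set.add s1 (l - r)
  let s3 := PySem.Set.add s2 (l * r)
  if r ≠ 0 then PySem.Set.add s3 (PySem.Int.floordiv l r) else s3

-- calc(dp, a, b); indices are Nat because every Python index here is a nonnegative in-range literal
def pvCalc (dp : List (PySem.Set Int)) (a b : Nat) : List (PySem.Set Int) :=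
  (dp.getD a []).foldl (fun d1 left =>
    (d1.getD b []).foldl (fun d2 right =>
      d2.set (a + b) (pvOps (d2.getD (a + b) []) left right)) d1) dp

-- the `for i in range(2, 9)` loop with its early return
def pvLoopA (number : Int) : List (PySem.Set Int) → List Nat → Int
  | _, [] => -1
  | dp, i :: rest =>
      let dp' := (List.range' 1 (i - 1)).foldl (fun d j => pvCalc d j (i - j)) dp
      if number ∈ dp'.getD i [] then (i : Int) else pvLoopA number dp' rest

def solution (N : Int) (number : Int) : Int :=
  let dp0 : List (PySem.Set Int) := (List.range 9).map (fun _ => PySem.Set.empty)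
  let dp1 := (List.range' 1 8).foldl
    (fun d i => d.set i (PySem.Set.add (d.getD i []) (pvSeed N i))) dp0
  if number ∈ dp1.getD 1 [] then 1
  else pvLoopA number dp1 (List.range' 2 7)

-- ===== PORT B =====
-- the two nested `for left / for right` loops of reach's body
def pvCombine (s : PySem.Set Int) (ls rs : List Int) : PySem.Set Int :=
  ls.foldl (fun v1 left => rs.foldl (fun v2 right => pvOps v2 left right) v1) s

-- reach(k); Python's memo cache is pure caching, so it is plain recursion here
def reachB (N : Int) (k : Nat) : PySem.Set Int :=
  (List.range' 1 (k - 1)).attach.foldl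
    (fun vals j => pvCombine vals (reachB N j.1) (reachB N (k - j.1)))
    (PySem.Set.add PySem.Set.empty (pvSeed N k))
termination_by k
decreasing_by
  · have h := j.2; rw [List.mem_range'_1] at h; omega
  · have h := j.2; rw [List.mem_range'_1] at h; omega

-- the `for k in range(1, 9)` loop with its early return
def pvLoopB (N number : Int) : List Nat → Int
  | [] => -1
  | k :: rest => if number ∈ reachB N k then (k : Int) else pvLoopB N number rest

def solution_alt (N : Int) (number : Int) : Int :=
  pvLoopB N number (List.range' 1 8)

-- ===== PRECONDITION & SPEC =====
-- Pre_ excludes N < 0, where Python A raises ValueError: int("-3-3") at the seed int(str(N)*i), i ≥ 2.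
def Pre_solution (N : Int) (number : Int) : Prop := 0 ≤ N
instance (N : Int) (number : Int) : Decidable (Pre_solution N number) := by
  unfold Pre_solution; infer_instance
def pvWitness_solution : Int × Int := (5, 12)

def Spec_solution (N : Int) (number : Int) (out : Int) : Prop := out = solution_alt N number
instance (N : Int) (number : Int) (out : Int) : Decidable (Spec_solution N number out) := by
  unfold Spec_solution; infer_instance

-- ===== CLAIM (what is proved, stated in full; the proofs are below) =====
def Claim_equal_solution : Prop := ∀ (N : Int) (number : Int), Dom_solution N number →
  Pre_solution N number → Spec_solution N number (solution N number)

-- ===== LEMMAS AND PROOFS =====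

lemma pvGetD_set_self (l : List (PySem.Set Int)) (i : Nat) (v : PySem.Set Int)
    (h : i < l.length) : (l.set i v).getD i [] = v := by
  rw [List.getD_eq_getElem?_getD, List.getElem?_set_self (by simpa using h)]; rfl

lemma pvGetD_set_ne (l : List (PySem.Set Int)) (i j : Nat) (v : PySem.Set Int)
    (h : j ≠ i) : (l.set i v).getD j [] = l.getD j [] := by
  rw [List.getD_eq_getElem?_getD, List.getD_eq_getElem?_getD,
    List.getElem?_set_ne (by omega)]

lemma pvSet_getD_self (l : List (PySem.Set Int)) (i : Nat) (h : i < l.length) :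
    l.set i (l.getD i []) = l := by
  have hg : l.getD i [] = l[i] := by
    rw [List.getD_eq_getElem?_getD, List.getElem?_eq_getElem h]; rfl
  rw [hg]; exact List.set_getElem_self h

-- A's innermost loop (over right) only rewrites slot m
lemma pvFoldl_set_ops (m : Nat) (l : Int) : ∀ (rs : List Int) (d : List (PySem.Set Int)),
    m < d.length →
    rs.foldl (fun d2 r => d2.set m (pvOps (d2.getD m []) l r)) d
      = d.set m (rs.foldl (fun v r => pvOps v l r) (d.getD m [])) := by
  intro rs
  induction rs with
  | nil => intro d h; simpa using (pvSet_getD_self d m h).symm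
  | cons r rs ih =>
      intro d h
      simp only [List.foldl_cons]
      rw [ih _ (by simpa using h), List.set_set, pvGetD_set_self _ _ _ h]

-- A's middle loop (over left) equals one pvCombine written into slot m
lemma pvFoldl_mid (m b : Nat) (hb : b ≠ m) : ∀ (ls : List Int) (d : List (PySem.Set Int)),
    m < d.length →
    ls.foldl (fun d1 l => (d1.getD b []).foldl
        (fun d2 r => d2.set m (pvOps (d2.getD m []) l r)) d1) d
      = d.set m (pvCombine (d.getD m []) ls (d.getD b [])) := by
  intro ls
  induction ls with
  | nil => intro d h; simpa [pvCombine] using (pvSet_getD_self d m h).symm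
  | cons l ls ih =>
      intro d h
      simp only [List.foldl_cons]
      rw [pvFoldl_set_ops m l _ d h]
      rw [ih _ (by simpa using h)]
      rw [List.set_set, pvGetD_set_self _ _ _ h, pvGetD_set_ne _ _ _ _ hb]
      rfl

lemma pvCalc_eq (dp : List (PySem.Set Int)) (a b : Nat) (ha : a ≠ 0)
    (hm : a + b < dp.length) :
    pvCalc dp a b
      = dp.set (a + b) (pvCombine (dp.getD (a + b) []) (dp.getD a []) (dp.getD b [])) := by
  unfold pvCalc
  exact pvFoldl_mid (a + b) b (by omega) (dp.getD a []) dp hm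

-- one whole stage i of A's outer loop, as a single write into slot i
lemma pvStageFold (i : Nat) (hi : i ≤ 8) : ∀ (js : List Nat) (d : List (PySem.Set Int)),
    d.length = 9 → (∀ j ∈ js, 1 ≤ j ∧ j < i) →
    js.foldl (fun d j => pvCalc d j (i - j)) d
      = d.set i (js.foldl
          (fun v j => pvCombine v (d.getD j []) (d.getD (i - j) [])) (d.getD i [])) := by
  intro js
  induction js with
  | nil => intro d hd _; simpa using (pvSet_getD_self d i (by omega)).symm
  | cons j js ih =>
      intro d hd hjs
      obtain ⟨hj1, hji⟩ := hjs j (List.mem_cons_self ..)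
      have hsum : j + (i - j) = i := by omega
      simp only [List.foldl_cons]
      rw [pvCalc_eq d j (i - j) (by omega) (by omega), hsum]
      rw [ih _ (by simpa using hd) (fun j' hj' => hjs j' (List.mem_cons_of_mem _ hj'))]
      rw [List.set_set, pvGetD_set_self _ _ _ (by omega)]
      set C0 : PySem.Set Int := pvCombine (d.getD i []) (d.getD j []) (d.getD (i - j) []) with hC0
      have hext : ∀ (v : PySem.Set Int) (j' : Nat), j' ∈ js →
          pvCombine v ((d.set i C0).getD j' []) ((d.set i C0).getD (i - j') [])
            = pvCombine v (d.getD j' []) (d.getD (i - j') []) := by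
        intro v j' hj'
        obtain ⟨h1, h2⟩ := hjs j' (List.mem_cons_of_mem _ hj')
        rw [pvGetD_set_ne _ _ _ _ (by omega), pvGetD_set_ne _ _ _ _ (by omega)]
      rw [List.foldl_ext _ _ _ (fun v j' hj' => hext v j' hj')]

-- reach(k) without the attach wrapper
lemma reachB_eq (N : Int) (k : Nat) :
    reachB N k = (List.range' 1 (k - 1)).foldl
      (fun v j => pvCombine v (reachB N j) (reachB N (k - j))) [pvSeed N k] := by
  rw [reachB, List.foldl_attach (f := fun v j => pvCombine v (reachB N j) (reachB N (k - j)))]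
  rfl

-- invariant of A's table before stage i: slots below i are complete (= reach), slots from i on hold only the seed
def InvD (N : Int) (i : Nat) (d : List (PySem.Set Int)) : Prop :=
  d.length = 9 ∧ (∀ k, 1 ≤ k → k < i → d.getD k [] = reachB N k)
    ∧ (∀ k, i ≤ k → k ≤ 8 → d.getD k [] = [pvSeed N k])

lemma pvStage_inv (N : Int) (i : Nat) (h2 : 2 ≤ i) (h8 : i ≤ 8)
    (d : List (PySem.Set Int)) (hInv : InvD N i d) :
    InvD N (i + 1) ((List.range' 1 (i - 1)).foldl (fun d j => pvCalc d j (i - j)) d) := by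
  obtain ⟨hlen, hlow, hhigh⟩ := hInv
  have hjs : ∀ j ∈ List.range' 1 (i - 1), 1 ≤ j ∧ j < i := by
    intro j hj; rw [List.mem_range'_1] at hj; omega
  rw [pvStageFold i h8 _ d hlen hjs]
  refine ⟨by simpa using hlen, ?_, ?_⟩
  · intro k hk1 hki
    by_cases hk : k = i
    · subst hk
      rw [pvGetD_set_self _ _ _ (by omega), reachB_eq, hhigh k (le_refl k) h8]
      exact List.foldl_ext _ _ _ (fun v j hj => by
        obtain ⟨h1, h2⟩ := hjs j hj
        rw [hlow j h1 h2, hlow (k - j) (by omega) (by omega)])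
    · rw [pvGetD_set_ne _ _ _ _ hk]; exact hlow k hk1 (by omega)
  · intro k hki hk8
    rw [pvGetD_set_ne _ _ _ _ (by omega)]; exact hhigh k (by omega) hk8

lemma pvLoop_eq (N number : Int) : ∀ (cnt i : Nat), 2 ≤ i → i + cnt = 9 →
    ∀ d, InvD N i d →
    pvLoopA number d (List.range' i cnt) = pvLoopB N number (List.range' i cnt) := by
  intro cnt
  induction cnt with
  | zero => intro i _ _ d _; rfl
  | succ cnt ih =>
      intro i h2 h9 d hInv
      rw [List.range'_succ]
      simp only [pvLoopA, pvLoopB]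
      have hInv' := pvStage_inv N i h2 (by omega) d hInv
      have hmi : ((List.range' 1 (i - 1)).foldl (fun d j => pvCalc d j (i - j)) d).getD i []
          = reachB N i := hInv'.2.1 i (by omega) (by omega)
      rw [hmi]
      by_cases hmem : number ∈ reachB N i
      · simp [hmem]
      · simp only [hmem, if_false]
        exact ih (i + 1) (by omega) (by omega) _ hInv'

-- A's table right after the seeding loop
def pvD1 (N : Int) : List (PySem.Set Int) :=
  [[], [pvSeed N 1], [pvSeed N 2], [pvSeed N 3], [pvSeed N 4],
   [pvSeed N 5], [pvSeed N 6], [pvSeed N 7], [pvSeed N 8]]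

lemma reachB_one (N : Int) : reachB N 1 = [pvSeed N 1] := by
  rw [reachB_eq]; rfl

lemma pvInvD1 (N : Int) : InvD N 2 (pvD1 N) := by
  refine ⟨rfl, ?_, ?_⟩
  · intro k hk1 hk2
    have : k = 1 := by omega
    subst this
    rw [reachB_one]; rfl
  · intro k hk2 hk8
    interval_cases k <;> rfl

lemma pvSolution_unfold (N number : Int) :
    solution N number
      = if number ∈ ([pvSeed N 1] : List Int) then 1
        else pvLoopA number (pvD1 N) (List.range' 2 7) := by
  rfl

-- ===== VERDICT (by name: the statement is the Claim_ definition above) =====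
theorem solution_spec : Claim_equal_solution := by
  intro N number _ _
  unfold Spec_solution
  rw [pvSolution_unfold]
  have halt : solution_alt N number
      = if number ∈ reachB N 1 then 1 else pvLoopB N number (List.range' 2 7) := by
    rfl
  rw [halt, reachB_one]
  by_cases h : number ∈ ([pvSeed N 1] : List Int)
  · simp [h]
  · simp only [h, if_false]
    exact pvLoop_eq N number 7 2 (le_refl 2) rfl (pvD1 N) (pvInvD1 N)
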